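-- pv_equiv track=rewrite | github.com/tkriplean/Erg-Nerd | components/session_chart_builder.py | _stitch_interval_times
-- ===== SOURCE A (Python) =====
-- from typing import Optional
--
-- def _stitch_interval_times(
--     strokes: list,
--     intervals: Optional[list] = None,
-- ) -> list:
--     """
--     Return a copy of strokes with t values made monotonically increasing.
--
--     The Concept2 API resets t to 0 at the start of each work interval.
--     t does NOT reset separately for rest periods — rest strokes (if any)
--     continue counting up from where the work strokes left off, and the
--     next reset happens only when the following work interval begins.
--     This means there is exactly one backward jump per interval boundary.
--
--     At each jump we know which interval just ended, so we advance the offset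
--     by the full canonical duration of that interval (work time + rest time)
--     rather than by prev_t.  This is necessary because the last stroke before
--     a boundary may arrive several tenths before the interval actually ends,
--     and accumulating prev_t would compress the chart timeline by that gap on
--     every boundary.
--
--     Falls back to accumulating prev_t if interval metadata is absent or
--     exhausted.
--
--     Anomalous device-emitted strokes with small backward-t values are removed
--     upstream by concept2.get_strokes(), so every backward jump seen here is a
--     genuine section reset.
--     """
--     if not strokes:
--         return strokes
--
--     result = []
--     offset = 0
--     prev_t = 0
--     interval_idx = 0  # index of the interval that just ended at each jump
--
--     for i, s in enumerate(strokes):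
--         t = s.get("t", 0)
--         if i > 0 and t < prev_t:
--             if intervals and interval_idx < len(intervals):
--                 iv = intervals[interval_idx]
--                 offset += (iv.get("time") or 0) + (iv.get("rest_time") or 0)
--             else:
--                 offset += prev_t  # fallback
--             interval_idx += 1
--         prev_t = t
--         stitched = dict(s)
--         stitched["t"] = t + offset
--         result.append(stitched)
--     return result
-- ===== SOURCE B (Python) =====
-- from typing import Optional
--
--
-- def _stitch_interval_times(
--     strokes: list,
--     intervals: Optional[list] = None,
-- ) -> list:
--     """Two-pass rewrite: materialize an offset table (boundary index ->
--     cumulative offset), then emit strokes switching offsets at table entries."""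
--     if not strokes:
--         return strokes
--
--     ts = [s.get("t", 0) for s in strokes]
--
--     # pass 1: offset table — (boundary index, cumulative offset active from there)
--     table = []
--     total = 0
--     for k in range(1, len(ts)):
--         if ts[k] < ts[k - 1]:
--             n = len(table)
--             if intervals and n < len(intervals):
--                 iv = intervals[n]
--                 total += (iv.get("time") or 0) + (iv.get("rest_time") or 0)
--             else:
--                 total += ts[k - 1]
--             table.append((k, total))
--
--     # pass 2: emit strokes, advancing through the table
--     result = []
--     offset = 0
--     rest_table = table
--     for i, (s, t) in enumerate(zip(strokes, ts)):
--         if rest_table and rest_table[0][0] == i: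
--             offset = rest_table[0][1]
--             rest_table = rest_table[1:]
--         d = dict(s)
--         d["t"] = t + offset
--         result.append(d)
--     return result
-- ===== Notes on version B (the rewrite author's own statement) =====
-- stated objective: alternative
-- what changed: A's single stateful pass carrying (offset, prev_t, interval_idx) while building dicts is replaced by a two-pass decomposition: pass 1 materializes an offset table of (boundary index, cumulative offset) pairs from the t-values alone, pass 2 emits the stroke dicts, merely switching the active offset when it crosses a table entry.
import Mathlib
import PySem

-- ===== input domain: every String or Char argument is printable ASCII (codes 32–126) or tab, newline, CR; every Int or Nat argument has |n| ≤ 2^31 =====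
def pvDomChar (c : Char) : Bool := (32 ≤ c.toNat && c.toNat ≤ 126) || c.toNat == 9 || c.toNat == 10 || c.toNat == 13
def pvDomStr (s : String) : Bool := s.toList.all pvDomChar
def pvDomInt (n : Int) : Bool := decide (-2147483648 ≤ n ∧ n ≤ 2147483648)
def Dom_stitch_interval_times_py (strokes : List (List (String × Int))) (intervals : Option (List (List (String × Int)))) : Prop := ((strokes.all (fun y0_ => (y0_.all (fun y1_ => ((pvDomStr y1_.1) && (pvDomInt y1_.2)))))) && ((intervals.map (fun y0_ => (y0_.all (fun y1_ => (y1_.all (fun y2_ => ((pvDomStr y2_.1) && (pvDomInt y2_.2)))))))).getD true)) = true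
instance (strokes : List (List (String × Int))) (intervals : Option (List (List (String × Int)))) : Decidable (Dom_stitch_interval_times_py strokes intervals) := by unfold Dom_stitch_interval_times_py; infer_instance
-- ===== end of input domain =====

-- B replaces A's single stateful pass (offset/prev_t/interval_idx carried together) by a
-- materialized offset table built in one pass and a second pass that only switches offsets
-- at table entries; objective: alternative decomposition, same cost.

-- ===== PORT A =====
-- A's for-loop over enumerate(strokes), state (result, offset, prev_t, interval_idx), as structural recursion.
def aLoop (intervals : Option (List (List (String × Int)))) :
    List (List (String × Int)) → Nat → List (List (String × Int)) → Int → Int → Nat → List (List (String × Int))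
  | [], _, result, _, _, _ => result
  | s :: rest, i, result, offset, prev_t, interval_idx =>
    let t := (PySem.Dict.ofList s).getD "t" 0
    let st :=
      if 0 < i ∧ t < prev_t then
        match intervals with
        | some ivs =>
          if ivs ≠ [] ∧ interval_idx < ivs.length then
            let iv := PySem.Dict.ofList (ivs.getD interval_idx [])
            (offset + (iv.getD "time" 0 + iv.getD "rest_time" 0), interval_idx + 1)
          else (offset + prev_t, interval_idx + 1)
        | none => (offset + prev_t, interval_idx + 1)
      else (offset, interval_idx)
    let stitched := (PySem.Dict.ofList s).insert "t" (t + st.1)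
    aLoop intervals rest (i + 1) (result ++ [stitched.items]) st.1 t st.2

def stitch_interval_times_py (strokes : List (List (String × Int))) (intervals : Option (List (List (String × Int)))) : List (List (String × Int)) :=
  if strokes = [] then strokes
  else aLoop intervals strokes 0 [] 0 0 0

-- ===== PORT B =====
-- pass 1: 'for k in range(1, len(ts)): ...' as recursion carrying (prev, k, table, total).
def bPass1 (intervals : Option (List (List (String × Int)))) :
    Int → List Int → Nat → List (Nat × Int) → Int → List (Nat × Int)
  | _, [], _, table, _ => table
  | prev, t :: rest, k, table, total =>
    if t < prev then
      let n := table.length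
      let c :=
        match intervals with
        | some ivs =>
          if ivs ≠ [] ∧ n < ivs.length then
            let iv := PySem.Dict.ofList (ivs.getD n [])
            iv.getD "time" 0 + iv.getD "rest_time" 0
          else prev
        | none => prev
      bPass1 intervals t rest (k + 1) (table ++ [(k, total + c)]) (total + c)
    else bPass1 intervals t rest (k + 1) table total

-- pass 2: 'for i, (s, t) in enumerate(zip(strokes, ts)): ...' with the advancing table view.
def bPass2 : List (List (String × Int) × Int) → Nat → List (Nat × Int) → Int → List (List (String × Int)) → List (List (String × Int))
  | [], _, _, _, result => result
  | (s, t) :: rest, i, table, offset, result =>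
    let st :=
      match table with
      | [] => (offset, ([] : List (Nat × Int)))
      | (j, o) :: tl => if j = i then (o, tl) else (offset, (j, o) :: tl)
    let d := (PySem.Dict.ofList s).insert "t" (t + st.1)
    bPass2 rest (i + 1) st.2 st.1 (result ++ [d.items])

def stitch_interval_times_py_alt (strokes : List (List (String × Int))) (intervals : Option (List (List (String × Int)))) : List (List (String × Int)) :=
  if strokes = [] then strokes
  else
    let ts := strokes.map (fun s => (PySem.Dict.ofList s).getD "t" 0)
    match ts with
    | [] => strokes
    | t0 :: tsRest =>
      let table := bPass1 intervals t0 tsRest 1 [] 0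
      bPass2 (strokes.zip ts) 0 table 0 []

-- ===== PRECONDITION & SPEC =====
def Spec_stitch_interval_times_py (strokes : List (List (String × Int))) (intervals : Option (List (List (String × Int)))) (out : List (List (String × Int))) : Prop := out = stitch_interval_times_py_alt strokes intervals
instance (strokes : List (List (String × Int))) (intervals : Option (List (List (String × Int)))) (out : List (List (String × Int))) : Decidable (Spec_stitch_interval_times_py strokes intervals out) := by unfold Spec_stitch_interval_times_py; infer_instance

-- ===== CLAIM (what is proved, stated in full; the proofs are below) =====
def Claim_equal_stitch_interval_times_py : Prop := ∀ (strokes : List (List (String × Int))) (intervals : Option (List (List (String × Int)))), Dom_stitch_interval_times_py strokes intervals → Spec_stitch_interval_times_py strokes intervals (stitch_interval_times_py strokes intervals)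

-- ===== LEMMAS AND PROOFS =====

-- the contribution of the n-th boundary whose previous t-value is prev
def pvContrib (intervals : Option (List (List (String × Int)))) (n : Nat) (prev : Int) : Int :=
  match intervals with
  | some ivs =>
    if ivs ≠ [] ∧ n < ivs.length then
      let iv := PySem.Dict.ofList (ivs.getD n [])
      iv.getD "time" 0 + iv.getD "rest_time" 0
    else prev
  | none => prev

-- the table entries pass 1 still has to produce, as a fresh (non-accumulated) list
def pvFresh (intervals : Option (List (List (String × Int)))) : Int → List Int → Nat → Nat → Int → List (Nat × Int)
  | _, [], _, _, _ => []
  | prev, t :: rest, k, n, total =>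
    if t < prev then
      (k, total + pvContrib intervals n prev) :: pvFresh intervals t rest (k + 1) (n + 1) (total + pvContrib intervals n prev)
    else pvFresh intervals t rest (k + 1) n total

theorem bPass1_eq_fresh (intervals : Option (List (List (String × Int)))) (ts : List Int) :
    ∀ (prev : Int) (k : Nat) (table : List (Nat × Int)) (total : Int),
      bPass1 intervals prev ts k table total = table ++ pvFresh intervals prev ts k table.length total := by
  induction ts with
  | nil => intro prev k table total; simp [bPass1, pvFresh]
  | cons t rest ih =>
    intro prev k table total
    simp only [bPass1, pvFresh, pvContrib]
    split_ifs with h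
    · rw [ih]; simp
    · exact ih t (k + 1) table total

theorem pvFresh_ge (intervals : Option (List (List (String × Int)))) (ts : List Int) :
    ∀ (prev : Int) (k n : Nat) (total : Int) (p : Nat × Int),
      p ∈ pvFresh intervals prev ts k n total → k ≤ p.1 := by
  induction ts with
  | nil => intro prev k n total p hp; simp [pvFresh] at hp
  | cons t rest ih =>
    intro prev k n total p hp
    simp only [pvFresh] at hp
    split_ifs at hp with h
    · rcases List.mem_cons.mp hp with h1 | h1
      · subst h1; exact le_refl _
      · exact Nat.le_of_succ_le (ih t (k + 1) (n + 1) _ p h1)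
    · exact Nat.le_of_succ_le (ih t (k + 1) n total p hp)

-- one step of pass 2, as rewriting equations (empty table / head hits / head misses)
theorem bPass2_nil (s : List (String × Int)) (t : Int) (rest : List (List (String × Int) × Int))
    (i : Nat) (offset : Int) (res : List (List (String × Int))) :
    bPass2 ((s, t) :: rest) i [] offset res
      = bPass2 rest (i + 1) [] offset (res ++ [((PySem.Dict.ofList s).insert "t" (t + offset)).items]) := rfl

theorem bPass2_hit (s : List (String × Int)) (t : Int) (rest : List (List (String × Int) × Int))
    (i : Nat) (o : Int) (tl : List (Nat × Int)) (offset : Int) (res : List (List (String × Int))) :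
    bPass2 ((s, t) :: rest) i ((i, o) :: tl) offset res
      = bPass2 rest (i + 1) tl o (res ++ [((PySem.Dict.ofList s).insert "t" (t + o)).items]) := by
  simp [bPass2]

theorem bPass2_miss (s : List (String × Int)) (t : Int) (rest : List (List (String × Int) × Int))
    (i j : Nat) (o : Int) (tl : List (Nat × Int)) (offset : Int) (res : List (List (String × Int)))
    (h : ¬ (j = i)) :
    bPass2 ((s, t) :: rest) i ((j, o) :: tl) offset res
      = bPass2 rest (i + 1) ((j, o) :: tl) offset (res ++ [((PySem.Dict.ofList s).insert "t" (t + offset)).items]) := by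
  simp [bPass2, h]

-- main invariant: A's loop from position i (i ≥ 1) equals B's pass 2 over the remaining
-- strokes with the fresh part of the table
theorem main_inv (intervals : Option (List (List (String × Int)))) (S : List (List (String × Int))) :
    ∀ (i : Nat) (res : List (List (String × Int))) (offset prev : Int) (idx : Nat), 0 < i →
      aLoop intervals S i res offset prev idx
        = bPass2 (S.zip (S.map (fun s => (PySem.Dict.ofList s).getD "t" 0))) i
            (pvFresh intervals prev (S.map (fun s => (PySem.Dict.ofList s).getD "t" 0)) i idx offset) offset res := by
  induction S with
  | nil => intro i res offset prev idx hi; simp [aLoop, bPass2, pvFresh]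
  | cons s rest ih =>
    intro i res offset prev idx hi
    simp only [List.map_cons, List.zip_cons_cons, aLoop, pvFresh]
    by_cases ht : (PySem.Dict.ofList s).getD "t" 0 < prev
    · simp only [hi, ht, and_self, if_true]
      cases intervals with
      | none =>
        simp only [pvContrib]
        rw [bPass2_hit]
        exact ih (i + 1) _ _ _ _ (Nat.succ_pos i)
      | some ivs =>
        simp only [pvContrib]
        split_ifs with hiv
        · rw [bPass2_hit]
          exact ih (i + 1) _ _ _ _ (Nat.succ_pos i)
        · rw [bPass2_hit]
          exact ih (i + 1) _ _ _ _ (Nat.succ_pos i)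
    · simp only [ht, and_false, if_false]
      cases hT : pvFresh intervals ((PySem.Dict.ofList s).getD "t" 0)
          (rest.map (fun s => (PySem.Dict.ofList s).getD "t" 0)) (i + 1) idx offset with
      | nil =>
        rw [bPass2_nil, ← hT]
        exact ih (i + 1) _ _ _ _ (Nat.succ_pos i)
      | cons p tl =>
        obtain ⟨j, o⟩ := p
        have hge : i + 1 ≤ j :=
          pvFresh_ge intervals _ _ _ _ _ (j, o) (by rw [hT]; exact List.mem_cons_self)
        have hne : ¬ (j = i) := by omega
        rw [bPass2_miss _ _ _ _ _ _ _ _ _ hne, ← hT]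
        exact ih (i + 1) _ _ _ _ (Nat.succ_pos i)

-- ===== VERDICT (by name: the statement is the Claim_ definition above) =====
theorem stitch_interval_times_py_spec : Claim_equal_stitch_interval_times_py := by
  intro strokes intervals _
  unfold Spec_stitch_interval_times_py stitch_interval_times_py stitch_interval_times_py_alt
  cases strokes with
  | nil => simp
  | cons s0 rest =>
    simp only [if_neg (List.cons_ne_nil s0 rest), List.map_cons, List.zip_cons_cons]
    rw [bPass1_eq_fresh]
    simp only [List.length_nil, List.nil_append, aLoop]
    have h0 : ¬ (0 < 0 ∧ (PySem.Dict.ofList s0).getD "t" 0 < (0 : Int)) := by simp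
    simp only [h0, if_false]
    cases hT : pvFresh intervals ((PySem.Dict.ofList s0).getD "t" 0)
        (rest.map (fun s => (PySem.Dict.ofList s).getD "t" 0)) 1 0 0 with
    | nil =>
      rw [bPass2_nil, ← hT]
      exact main_inv intervals rest 1 _ _ _ _ Nat.one_pos
    | cons p tl =>
      obtain ⟨j, o⟩ := p
      have hge : 1 ≤ j :=
        pvFresh_ge intervals _ _ _ _ _ (j, o) (by rw [hT]; exact List.mem_cons_self)
      have hne : ¬ (j = 0) := by omega
      rw [bPass2_miss _ _ _ _ _ _ _ _ _ hne, ← hT]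
      exact main_inv intervals rest 1 _ _ _ _ Nat.one_pos
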